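-- pv_equiv track=rewrite | github.com/ChathurangaBW/XSStrike-Reborn | core/utils.py | stripper
-- ===== SOURCE A (Python) =====
-- def stripper(string, substring, direction='right'):
--     done = False
--     stripped_string = ''
--     if direction == 'right':
--         string = string[::-1]
--     for char in string:
--         if char == substring and not done:
--             done = True
--         else:
--             stripped_string += char
--     if direction == 'right':
--         stripped_string = stripped_string[::-1]
--     return stripped_string
-- ===== SOURCE B (Python) =====
-- def stripper(string, substring, direction='right'):
--     # A only ever removes when a single character equals `substring`,
--     # so multi-char (or empty) substrings leave the string unchanged.
--     if len(substring) != 1: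
--         return string
--     i = string.rfind(substring) if direction == 'right' else string.find(substring)
--     if i == -1:
--         return string
--     return string[:i] + string[i + 1:]
-- ===== Notes on version B (the rewrite author's own statement) =====
-- stated objective: faster
-- what changed: B replaces A's per-character accumulator loop (quadratic string concatenation, plus two full reversals for direction='right') with a single find/rfind to locate the occurrence and two slices to excise it.
import Mathlib
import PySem

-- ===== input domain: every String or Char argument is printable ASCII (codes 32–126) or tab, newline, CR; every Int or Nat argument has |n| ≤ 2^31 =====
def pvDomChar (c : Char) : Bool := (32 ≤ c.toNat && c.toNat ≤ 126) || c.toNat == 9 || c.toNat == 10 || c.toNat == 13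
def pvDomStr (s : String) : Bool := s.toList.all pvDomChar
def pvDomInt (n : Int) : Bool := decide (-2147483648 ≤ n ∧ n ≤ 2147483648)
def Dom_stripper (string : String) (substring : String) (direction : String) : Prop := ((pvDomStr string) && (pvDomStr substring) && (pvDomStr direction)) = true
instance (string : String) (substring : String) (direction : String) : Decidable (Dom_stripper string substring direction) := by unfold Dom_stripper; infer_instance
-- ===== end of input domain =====

-- B replaces A's per-character accumulator loop (quadratic string building, plus two
-- reversals for direction='right') by a single find/rfind followed by two slices.


-- ===== PORT A =====
def stripper (string : String) (substring : String) (direction : String) : String :=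
  -- done = False; stripped_string = ''; string[::-1] is reverse (PySem.Chars.slice?_none_none_neg_one)
  let s := if direction == "right" then string.toList.reverse else string.toList
  let r := s.foldl (fun (st : Bool × List Char) char =>
      if [char] == substring.toList && !st.1 then (true, st.2)
      else (st.1, st.2 ++ [char])) (false, [])
  let out := if direction == "right" then r.2.reverse else r.2
  String.ofList out

-- ===== PORT B =====
def stripper_alt (string : String) (substring : String) (direction : String) : String :=
  if substring.toList.length ≠ 1 then string
  else
    let i : Int := if direction == "right" then PySem.Str.rfind string substring
                   else PySem.Str.find string substring
    if i == -1 then string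
    else String.ofList (PySem.Chars.slice string.toList none (some i) ++
                    PySem.Chars.slice string.toList (some (i + 1)) none)

-- ===== PRECONDITION & SPEC =====
def Spec_stripper (string : String) (substring : String) (direction : String) (out : String) : Prop := out = stripper_alt string substring direction
instance (string : String) (substring : String) (direction : String) (out : String) : Decidable (Spec_stripper string substring direction out) := by unfold Spec_stripper; infer_instance

-- ===== CLAIM (what is proved, stated in full; the proofs are below) =====
def Claim_equal_stripper : Prop := ∀ (string : String) (substring : String) (direction : String), Dom_stripper string substring direction → Spec_stripper string substring direction (stripper string substring direction)

-- ===== LEMMAS AND PROOFS =====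

-- spec helper: remove the first occurrence of c0 (identity if absent)
def pvRF (c0 : Char) : List Char → List Char
  | [] => []
  | x :: xs => if c0 == x then xs else x :: pvRF c0 xs

theorem pvRF_not_mem (c0 : Char) (l : List Char) (h : c0 ∉ l) : pvRF c0 l = l := by
  induction l with
  | nil => rfl
  | cons x xs ih =>
    simp only [List.mem_cons, not_or] at h
    simp only [pvRF]
    rw [if_neg (by simp [h.1]), ih h.2]

theorem pvRF_append (c0 : Char) (l1 l2 : List Char) (h : c0 ∉ l1) :
    pvRF c0 (l1 ++ c0 :: l2) = l1 ++ l2 := by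
  induction l1 with
  | nil => simp [pvRF]
  | cons x xs ih =>
    simp only [List.mem_cons, not_or] at h
    simp only [List.cons_append, pvRF]
    rw [if_neg (by simp [h.1]), ih h.2]

theorem pv_singleton_prefix (c0 : Char) (l : List Char) :
    [c0] <+: l ↔ l.head? = some c0 := by
  cases l with
  | nil => simp
  | cons x xs => simp [List.cons_prefix_cons, eq_comm]

-- A's loop, once done is set, just copies the rest
theorem pv_fold_true (sub : List Char) (cs acc : List Char) :
    cs.foldl (fun (st : Bool × List Char) char =>
      if [char] == sub && !st.1 then (true, st.2)
      else (st.1, st.2 ++ [char])) (true, acc) = (true, acc ++ cs) := by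
  induction cs generalizing acc with
  | nil => simp
  | cons x xs ih =>
    simp only [List.foldl_cons, Bool.not_true, Bool.and_false, Bool.false_eq_true, if_false]
    rw [ih]
    simp

-- A's loop when the substring can never match a single character
theorem pv_fold_nomatch (sub : List Char) (h : ∀ c : Char, sub ≠ [c])
    (cs : List Char) : ∀ acc : List Char, ∀ d : Bool,
    cs.foldl (fun (st : Bool × List Char) char =>
      if [char] == sub && !st.1 then (true, st.2)
      else (st.1, st.2 ++ [char])) (d, acc) = (d, acc ++ cs) := by
  induction cs with
  | nil => simp
  | cons x xs ih =>
    intro acc d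
    have hx : (([x] : List Char) == sub) = false := by
      rw [beq_eq_false_iff_ne]
      exact fun he => h x he.symm
    simp only [List.foldl_cons, hx, Bool.false_and, Bool.false_eq_true, if_false]
    rw [ih]
    simp

-- A's loop from done=false removes the first occurrence
theorem pv_fold_false (c0 : Char) (cs : List Char) : ∀ acc : List Char,
    (cs.foldl (fun (st : Bool × List Char) char =>
      if [char] == [c0] && !st.1 then (true, st.2)
      else (st.1, st.2 ++ [char])) (false, acc)).2 = acc ++ pvRF c0 cs := by
  induction cs with
  | nil => simp [pvRF]
  | cons x xs ih =>
    intro acc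
    simp only [List.foldl_cons]
    by_cases hx : c0 = x
    · subst hx
      rw [if_pos (by simp)]
      rw [pv_fold_true]
      simp [pvRF]
    · rw [if_neg (by simp only [Bool.not_false, Bool.and_true, beq_iff_eq,
        List.cons.injEq, and_true]; exact fun he => hx he.symm)]
      rw [ih]
      simp [pvRF, hx]

theorem pv_isPrefix_single (c0 : Char) (cs : List Char) (j : Nat) :
    ([c0].isPrefixOf (cs.drop j)) = true ↔ cs[j]? = some c0 := by
  rw [List.isPrefixOf_iff_prefix, pv_singleton_prefix, List.head?_drop]

-- decompose a list at a known occurrence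
theorem pv_decomp (c0 : Char) (cs : List Char) (i : Nat) (h : cs[i]? = some c0) :
    cs = cs.take i ++ c0 :: cs.drop (i + 1) := by
  obtain ⟨hi, hv⟩ := List.getElem?_eq_some_iff.1 h
  conv_lhs => rw [← List.take_append_drop i cs]
  rw [← List.getElem_cons_drop hi, hv]

theorem pv_not_mem_take (c0 : Char) (cs : List Char) (i : Nat)
    (h : ∀ j < i, cs[j]? ≠ some c0) : c0 ∉ cs.take i := by
  intro hmem
  obtain ⟨j, hj, hv⟩ := List.getElem_of_mem hmem
  have hji : j < i := lt_of_lt_of_le hj (by simp [List.length_take])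
  exact h j hji (List.getElem?_eq_some_iff.2 ⟨by
    have := hj; simp [List.length_take] at this; omega, by rw [← List.getElem_take (h := hj), hv]⟩)

-- what A's removal does, expressed by B's find-and-slice (left direction)
theorem pv_left_eq (c0 : Char) (cs : List Char) :
    pvRF c0 cs =
      (if (PySem.Chars.find cs [c0] == (-1 : Int)) = true then cs
       else PySem.Chars.slice cs none (some (PySem.Chars.find cs [c0])) ++
            PySem.Chars.slice cs (some (PySem.Chars.find cs [c0] + 1)) none) := by
  by_cases hm : c0 ∈ cs
  · obtain ⟨l1, l2, hsplit⟩ := List.append_of_mem hm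
    have hinf : [c0] <:+: cs := ⟨l1, l2, by rw [hsplit]; simp⟩
    have hpos : 0 ≤ PySem.Chars.find cs [c0] := (PySem.Chars.find_nonneg_iff _ _).2 hinf
    obtain ⟨hpre, hmin⟩ := PySem.Chars.find_spec hpos
    have hif : PySem.Chars.find cs [c0] = ((PySem.Chars.find cs [c0]).toNat : Int) :=
      (Int.toNat_of_nonneg hpos).symm
    set i := (PySem.Chars.find cs [c0]).toNat with hidef
    have hci : cs[i]? = some c0 := by
      rw [← List.head?_drop]
      exact (pv_singleton_prefix _ _).1 hpre
    rw [if_neg (by simp only [beq_iff_eq]; omega)]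
    have hmin' : ∀ j < i, cs[j]? ≠ some c0 := fun j hj hv =>
      hmin j hj ((pv_singleton_prefix c0 (cs.drop j)).2 (by rw [List.head?_drop]; exact hv))
    have hslice : PySem.Chars.slice cs none (some (PySem.Chars.find cs [c0])) ++
        PySem.Chars.slice cs (some (PySem.Chars.find cs [c0] + 1)) none
        = cs.take i ++ cs.drop (i + 1) := by
      rw [PySem.Chars.slice_eq_listSlice, PySem.Chars.slice_eq_listSlice, hif]
      rw [show ((i : Int) + 1) = ((i + 1 : Nat) : Int) by push_cast; ring]
      rw [PySem.List.slice_to_natCast, PySem.List.slice_from_natCast]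
    rw [hslice]
    conv_lhs => rw [pv_decomp c0 cs i hci]
    exact pvRF_append c0 _ _ (pv_not_mem_take c0 cs i hmin')
  · have hne : PySem.Chars.find cs [c0] = -1 :=
      (PySem.Chars.find_eq_neg_one_iff _ _).2 fun hinf =>
        hm (hinf.sublist.subset (List.mem_singleton_self c0))
    rw [if_pos (by simp [hne])]
    exact pvRF_not_mem c0 cs hm

-- rfind.go returns the greatest occurrence index ≤ n (or -1)
theorem pv_go_spec (cs : List Char) (c0 : Char) : ∀ n : Nat,
    (PySem.Chars.rfind.go cs [c0] n = -1 ∧ ∀ j ≤ n, cs[j]? ≠ some c0) ∨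
    (∃ j ≤ n, PySem.Chars.rfind.go cs [c0] n = (j : Int) ∧ cs[j]? = some c0 ∧
      ∀ k, j < k → k ≤ n → cs[k]? ≠ some c0) := by
  intro n
  induction n with
  | zero =>
    have e : PySem.Chars.rfind.go cs [c0] 0 = if [c0].isPrefixOf cs then 0 else -1 := by
      simp [PySem.Chars.rfind.go]
    by_cases h : cs[0]? = some c0
    · right
      refine ⟨0, le_refl 0, ?_, h, fun k hk hk2 => by omega⟩
      have hp := (pv_isPrefix_single c0 cs 0).2 (by simpa using h)
      rw [List.drop_zero] at hp
      rw [e, if_pos hp]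
      simp
    · left
      refine ⟨?_, fun j hj => by interval_cases j; exact h⟩
      rw [e, if_neg (fun hp => h (by
        have := (pv_isPrefix_single c0 cs 0).1 (by rw [List.drop_zero]; exact hp)
        simpa using this))]
  | succ n ih =>
    have e : PySem.Chars.rfind.go cs [c0] (n + 1) =
        if [c0].isPrefixOf (cs.drop (n + 1)) then ((n : Int) + 1)
        else PySem.Chars.rfind.go cs [c0] n := by
      simp [PySem.Chars.rfind.go]
    by_cases h : cs[n + 1]? = some c0
    · right
      refine ⟨n + 1, le_refl _, ?_, h, fun k hk hk2 => by omega⟩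
      rw [e, if_pos ((pv_isPrefix_single c0 cs (n + 1)).2 h)]
      push_cast
      ring
    · have hne : ¬ ([c0].isPrefixOf (cs.drop (n + 1))) = true :=
        fun hp => h ((pv_isPrefix_single c0 cs (n + 1)).1 hp)
      rcases ih with ⟨h1, h2⟩ | ⟨j, hj, hg, hc, hmax⟩
      · left
        refine ⟨by rw [e, if_neg hne]; exact h1, fun j hj => ?_⟩
        rcases Nat.lt_or_ge j (n + 1) with hlt | hge
        · exact h2 j (by omega)
        · have : j = n + 1 := by omega
          subst this; exact h
      · right
        refine ⟨j, by omega, by rw [e, if_neg hne]; exact hg, hc, fun k hk hk2 => ?_⟩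
        rcases Nat.lt_or_ge k (n + 1) with hlt | hge
        · exact hmax k hk (by omega)
        · have : k = n + 1 := by omega
          subst this; exact h

-- what A's removal does, expressed by B's rfind-and-slice (right direction)
theorem pv_right_eq (c0 : Char) (cs : List Char) :
    (pvRF c0 cs.reverse).reverse =
      (if (PySem.Chars.rfind cs [c0] == (-1 : Int)) = true then cs
       else PySem.Chars.slice cs none (some (PySem.Chars.rfind cs [c0])) ++
            PySem.Chars.slice cs (some (PySem.Chars.rfind cs [c0] + 1)) none) := by
  have hrf : PySem.Chars.rfind cs [c0] = PySem.Chars.rfind.go cs [c0] cs.length := rfl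
  rcases pv_go_spec cs c0 cs.length with ⟨h1, h2⟩ | ⟨j, hj, hg, hc, hmax⟩
  · have hnm : c0 ∉ cs := by
      intro hmem
      obtain ⟨k, hk, hv⟩ := List.getElem_of_mem hmem
      exact h2 k (le_of_lt hk) (List.getElem?_eq_some_iff.2 ⟨hk, hv⟩)
    rw [if_pos (by simp [hrf, h1])]
    rw [pvRF_not_mem c0 cs.reverse (by simpa using hnm), List.reverse_reverse]
  · have hjl : j < cs.length := (List.getElem?_eq_some_iff.1 hc).1
    have hmax' : ∀ k, j < k → cs[k]? ≠ some c0 := fun k hk => by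
      by_cases hle : k ≤ cs.length
      · exact hmax k hk hle
      · intro hv
        rw [List.getElem?_eq_none (by omega)] at hv
        exact Option.some_ne_none c0 hv.symm
    have hnd : c0 ∉ cs.drop (j + 1) := by
      intro hmem
      obtain ⟨m, hm, hv⟩ := List.getElem_of_mem hmem
      exact hmax' (j + 1 + m) (by omega) (by
        rw [← List.getElem?_drop]
        exact List.getElem?_eq_some_iff.2 ⟨hm, hv⟩)
    rw [if_neg (by simp [hrf, hg])]
    have hslice : PySem.Chars.slice cs none (some (PySem.Chars.rfind cs [c0])) ++
        PySem.Chars.slice cs (some (PySem.Chars.rfind cs [c0] + 1)) none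
        = cs.take j ++ cs.drop (j + 1) := by
      rw [PySem.Chars.slice_eq_listSlice, PySem.Chars.slice_eq_listSlice, hrf, hg]
      rw [show ((j : Int) + 1) = ((j + 1 : Nat) : Int) by push_cast; ring]
      rw [PySem.List.slice_to_natCast, PySem.List.slice_from_natCast]
    rw [hslice]
    have hrev : cs.reverse = (cs.drop (j + 1)).reverse ++ c0 :: (cs.take j).reverse := by
      conv_lhs => rw [pv_decomp c0 cs j hc]
      simp
    rw [hrev, pvRF_append c0 _ _ (by simpa using hnd)]
    simp

-- ===== VERDICT (by name: the statement is the Claim_ definition above) =====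
theorem stripper_spec : Claim_equal_stripper := by
  intro s sub dir _
  simp only [Spec_stripper, stripper, stripper_alt]
  by_cases hlen : sub.toList.length = 1
  · obtain ⟨c0, hc0⟩ := List.length_eq_one_iff.1 hlen
    rw [if_neg (show ¬(sub.toList.length ≠ 1) by simp [hc0])]
    by_cases hdir : (dir == "right") = true
    · simp only [hdir, if_true, hc0, PySem.Str.rfind_eq]
      rw [pv_fold_false]
      have hkey := pv_right_eq c0 s.toList
      by_cases h1 : (PySem.Chars.rfind s.toList [c0] == (-1 : Int)) = true
      · rw [if_pos h1] at hkey ⊢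
        simp only [List.nil_append]
        rw [hkey, String.ofList_toList]
      · rw [if_neg h1] at hkey ⊢
        simp only [List.nil_append]
        rw [hkey]
    · simp only [Bool.not_eq_true] at hdir
      simp only [hdir, Bool.false_eq_true, if_false, hc0, PySem.Str.find_eq]
      rw [pv_fold_false]
      have hkey := pv_left_eq c0 s.toList
      by_cases h1 : (PySem.Chars.find s.toList [c0] == (-1 : Int)) = true
      · rw [if_pos h1] at hkey ⊢
        simp only [List.nil_append]
        rw [hkey, String.ofList_toList]
      · rw [if_neg h1] at hkey ⊢
        simp only [List.nil_append]
        rw [hkey]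
  · rw [if_pos (show sub.toList.length ≠ 1 from hlen)]
    have hns : ∀ c : Char, sub.toList ≠ [c] := fun c he => hlen (by rw [he]; rfl)
    by_cases hdir : (dir == "right") = true
    · simp only [hdir, if_true]
      rw [pv_fold_nomatch sub.toList hns]
      simp [String.ofList_toList]
    · simp only [Bool.not_eq_true] at hdir
      simp only [hdir, Bool.false_eq_true, if_false]
      rw [pv_fold_nomatch sub.toList hns]
      simp [String.ofList_toList]
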